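-- pv_equiv track=rewrite | github.com/faizazizan/keyword-wrapper | KW Wrapper.py | concatenate_keywords
-- ===== SOURCE A (Python) =====
-- def concatenate_keywords(keywords):
--     n = len(keywords)
--     results = []
--     for i in range(n):
--         for j in range(i, n):
--             keyword = " ".join(keywords[i:j+1])
--             if keyword not in results:
--                 results.append(keyword)
--     return results
-- ===== SOURCE B (Python) =====
-- def concatenate_keywords(keywords):
--     seen = set()
--     results = []
--     for i in range(len(keywords)):
--         acc = ""
--         first = True
--         for w in keywords[i:]:
--             acc = w if first else acc + " " + w
--             first = False
--             if acc not in seen: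
--                 seen.add(acc)
--                 results.append(acc)
--     return results
-- ===== Notes on version B (the rewrite author's own statement) =====
-- stated objective: faster
-- what changed: Instead of re-joining every slice keywords[i:j+1] from scratch and scanning the growing results list for membership, B keeps one running join per suffix (extending the string by one word per step) and dedups with a set alongside the ordered results list.
import Mathlib
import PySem

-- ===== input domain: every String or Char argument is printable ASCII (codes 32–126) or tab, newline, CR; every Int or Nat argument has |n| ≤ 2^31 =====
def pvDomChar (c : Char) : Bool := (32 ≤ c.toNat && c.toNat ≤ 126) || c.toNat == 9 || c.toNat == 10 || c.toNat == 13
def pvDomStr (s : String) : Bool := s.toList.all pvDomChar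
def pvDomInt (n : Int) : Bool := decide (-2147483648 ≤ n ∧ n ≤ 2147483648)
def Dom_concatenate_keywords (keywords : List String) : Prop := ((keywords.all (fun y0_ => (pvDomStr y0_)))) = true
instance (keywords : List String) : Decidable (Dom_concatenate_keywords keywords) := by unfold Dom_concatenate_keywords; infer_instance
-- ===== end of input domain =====

-- B replaces A's repeated full joins and list-membership scans by one incremental
-- running join per suffix plus a set for the dedup test (objective: faster).

-- ===== PORT A =====
def concatenate_keywords (keywords : List String) : List String :=
  let n : Int := (keywords.length : Int)
  (PySem.List.pyRange 0 n 1).foldl (fun results i =>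
    (PySem.List.pyRange i n 1).foldl (fun results j =>
      let keyword := PySem.Str.join " " (PySem.List.slice keywords (some i) (some (j + 1)))
      if keyword ∈ results then results else results ++ [keyword]) results) []

-- ===== PORT B =====
def concatenate_keywords_alt (keywords : List String) : List String :=
  ((PySem.List.pyRange 0 (keywords.length : Int) 1).foldl
    (fun (st : PySem.Set String × List String) i =>
      ((PySem.List.slice keywords (some i) none).foldl
        (fun (s : (PySem.Set String × List String) × String × Bool) w =>
          let acc := if s.2.2 then w else s.2.1 ++ " " ++ w
          if (s.1.1).contains acc then ((s.1.1, s.1.2), acc, false)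
          else ((PySem.Set.add s.1.1 acc, s.1.2 ++ [acc]), acc, false))
        ((st.1, st.2), "", true)).1)
    (PySem.Set.empty, [])).2

-- ===== PRECONDITION & SPEC =====
def Spec_concatenate_keywords (keywords : List String) (out : List String) : Prop := out = concatenate_keywords_alt keywords
instance (keywords : List String) (out : List String) : Decidable (Spec_concatenate_keywords keywords out) := by unfold Spec_concatenate_keywords; infer_instance

-- ===== CLAIM (what is proved, stated in full; the proofs are below) =====
def Claim_equal_concatenate_keywords : Prop := ∀ (keywords : List String), Dom_concatenate_keywords keywords → Spec_concatenate_keywords keywords (concatenate_keywords keywords)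

-- ===== LEMMAS AND PROOFS =====

-- append an element unless already present (A's dedup step)
def pvDedup (r : List String) (a : String) : List String := if a ∈ r then r else r ++ [a]

-- the stream of running joins B produces while scanning one suffix
def pvPJ (p : String) (first : Bool) : List String → List String
  | [] => []
  | w :: t => (if first then w else p ++ " " ++ w) :: pvPJ (if first then w else p ++ " " ++ w) false t

theorem pvPJ_true_irrel (p q : String) (l : List String) : pvPJ p true l = pvPJ q true l := by
  cases l <;> simp [pvPJ]

theorem pv_chars_join_snoc (L : List (List Char)) (q : List Char) :
    PySem.Chars.join [' '] (L ++ [q]) =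
      if L = [] then q else PySem.Chars.join [' '] L ++ [' '] ++ q := by
  induction L with
  | nil => simp [PySem.Chars.join_singleton]
  | cons a L ih =>
    cases L with
    | nil => simp [PySem.Chars.join_cons_cons, PySem.Chars.join_singleton]
    | cons b L2 =>
      rw [List.cons_append, List.cons_append, PySem.Chars.join_cons_cons]
      rw [← List.cons_append, ih]
      simp [PySem.Chars.join_cons_cons, List.append_assoc]

theorem pv_join_snoc (l : List String) (w : String) :
    PySem.Str.join " " (l ++ [w]) =
      if l = [] then w else PySem.Str.join " " l ++ " " ++ w := by
  rw [← String.toList_inj]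
  have h1 : (" " : String).toList = [' '] := by decide
  split_ifs with hl
  · subst hl; simp [PySem.Str.toList_join, h1, PySem.Chars.join_singleton]
  · simp only [PySem.Str.toList_join, List.map_append, List.map_cons, List.map_nil,
      String.toList_append, h1]
    rw [pv_chars_join_snoc]
    simp [hl]

theorem pv_inner_A (keywords : List String) (i : Nat) :
    ∀ (m k : Nat) (res : List String), keywords.length - (i + k) = m → i + k ≤ keywords.length →
    (PySem.List.pyRange ((i + k : Nat) : Int) ((keywords.length : Nat) : Int) 1).foldl
        (fun r j =>
          let keyword := PySem.Str.join " " (PySem.List.slice keywords (some (i : Int)) (some (j + 1)))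
          if keyword ∈ r then r else r ++ [keyword]) res
      = (pvPJ (PySem.Str.join " " ((keywords.drop i).take k)) (decide (k = 0)) (keywords.drop (i + k))).foldl pvDedup res := by
  intro m
  induction m with
  | zero =>
    intro k res hm hle
    have hik : i + k = keywords.length := by omega
    rw [PySem.List.pyRange_one_eq_nil (by exact_mod_cast le_of_eq hik.symm)]
    rw [List.drop_eq_nil_of_le (le_of_eq hik.symm)]
    rfl
  | succ m ihm =>
    intro k res hm hle
    have hlt : i + k < keywords.length := by omega
    rw [PySem.List.pyRange_one_cons (by exact_mod_cast hlt)]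
    rw [List.foldl_cons]
    -- the keyword at step j = i+k
    have hslice : PySem.List.slice keywords (some (i : Int)) (some (((i + k : Nat) : Int) + 1))
        = (keywords.drop i).take (k + 1) := by
      have : ((i + k : Nat) : Int) + 1 = ((i + k + 1 : Nat) : Int) := by push_cast; ring
      rw [this, PySem.List.slice_natCast]
      congr 1
      omega
    have htake : (keywords.drop i).take (k + 1) = (keywords.drop i).take k ++ [keywords[i + k]] := by
      rw [List.take_add_one]
      congr
      rw [List.getElem?_drop, List.getElem?_eq_getElem (by omega : i + k < keywords.length)]
      rfl
    have hkw : PySem.Str.join " " (PySem.List.slice keywords (some (i : Int)) (some (((i + k : Nat) : Int) + 1)))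
        = (if k = 0 then keywords[i + k] else PySem.Str.join " " ((keywords.drop i).take k) ++ " " ++ keywords[i + k]) := by
      rw [hslice, htake, pv_join_snoc]
      congr 1
      simp only [eq_iff_iff]
      constructor
      · intro h
        rcases List.take_eq_nil_iff.1 h with hk | hd
        · exact hk
        · have : keywords.length - i = 0 := by simpa using congrArg List.length hd
          omega
      · intro hk; subst hk; simp
    have hdrop : keywords.drop (i + k) = keywords[i + k] :: keywords.drop (i + k + 1) :=
      List.drop_eq_getElem_cons hlt
    rw [hdrop]
    set kw := (if k = 0 then keywords[i + k] else PySem.Str.join " " ((keywords.drop i).take k) ++ " " ++ keywords[i + k]) with hkwdef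
    have hhead : (if (decide (k = 0)) = true then keywords[i+k] else PySem.Str.join " " ((keywords.drop i).take k) ++ " " ++ keywords[i+k]) = kw := by
      by_cases hk : k = 0 <;> simp [hk, hkwdef]
    have step1 : (let keyword := PySem.Str.join " " (PySem.List.slice keywords (some (i : Int)) (some (((i + k : Nat) : Int) + 1))); if keyword ∈ res then res else res ++ [keyword]) = pvDedup res kw := by
      simp only [hkw, pvDedup]
    rw [step1]
    simp only [pvPJ, hhead, List.foldl_cons]
    have hjoin1 : PySem.Str.join " " ((keywords.drop i).take (k+1)) = kw := by
      rw [htake, pv_join_snoc]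
      by_cases hk : k = 0
      · subst hk; simp [hkwdef]
      · have hne : (keywords.drop i).take k ≠ [] := by
          intro h
          rcases List.take_eq_nil_iff.1 h with hk' | hd
          · exact hk hk'
          · have : keywords.length - i = 0 := by simpa using congrArg List.length hd
            omega
        simp [hne, hkwdef, hk]
    have := ihm (k + 1) (pvDedup res kw) (by omega) (by omega)
    rw [show i + (k+1) = i + k + 1 by ring] at this
    rw [show ((i+k:Nat):Int) + 1 = ((i + k + 1 : Nat) : Int) by push_cast; ring]
    rw [this, hjoin1]
    simp

theorem pv_inner_B (ws : List String) (p : String) (first : Bool)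
    (seen : PySem.Set String) (res : List String)
    (hc : ∀ x, x ∈ seen ↔ x ∈ res) :
    (ws.foldl
        (fun (s : (PySem.Set String × List String) × String × Bool) w =>
          let acc := if s.2.2 then w else s.2.1 ++ " " ++ w
          if (s.1.1).contains acc then ((s.1.1, s.1.2), acc, false)
          else ((PySem.Set.add s.1.1 acc, s.1.2 ++ [acc]), acc, false))
        ((seen, res), p, first)).1.2
      = (pvPJ p first ws).foldl pvDedup res
    ∧ (∀ x, x ∈ (ws.foldl
        (fun (s : (PySem.Set String × List String) × String × Bool) w =>
          let acc := if s.2.2 then w else s.2.1 ++ " " ++ w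
          if (s.1.1).contains acc then ((s.1.1, s.1.2), acc, false)
          else ((PySem.Set.add s.1.1 acc, s.1.2 ++ [acc]), acc, false))
        ((seen, res), p, first)).1.1 ↔ x ∈ (ws.foldl
        (fun (s : (PySem.Set String × List String) × String × Bool) w =>
          let acc := if s.2.2 then w else s.2.1 ++ " " ++ w
          if (s.1.1).contains acc then ((s.1.1, s.1.2), acc, false)
          else ((PySem.Set.add s.1.1 acc, s.1.2 ++ [acc]), acc, false))
        ((seen, res), p, first)).1.2) := by
  induction ws generalizing p first seen res with
  | nil => exact ⟨rfl, hc⟩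
  | cons w t ih =>
    simp only [List.foldl_cons, pvPJ]
    set acc := if first then w else p ++ " " ++ w with hacc
    by_cases hmem : acc ∈ res
    · have hcont : (seen.contains acc) = true := by
        simp [PySem.Set.contains, (hc acc).2 hmem]
      simp only [hcont, if_true]
      have := ih acc false seen res hc
      simpa [pvDedup, hmem] using this
    · have hcont : (seen.contains acc) = false := by
        simp [PySem.Set.contains]
        exact fun hx => hmem ((hc acc).1 hx)
      simp only [hcont, Bool.false_eq_true, if_false]
      have hc' : ∀ x, x ∈ PySem.Set.add seen acc ↔ x ∈ res ++ [acc] := by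
        intro x
        rw [PySem.Set.mem_add]
        simp [hc x, or_comm]
      have := ih acc false (PySem.Set.add seen acc) (res ++ [acc]) hc'
      simpa [pvDedup, hmem] using this

theorem pv_outer (keywords : List String) (l : List Int)
    (hb : ∀ j ∈ l, 0 ≤ j ∧ j ≤ (keywords.length : Int))
    (seen : PySem.Set String) (res : List String)
    (hc : ∀ x, x ∈ seen ↔ x ∈ res) :
    (l.foldl
        (fun (st : PySem.Set String × List String) i =>
          ((PySem.List.slice keywords (some i) none).foldl
            (fun (s : (PySem.Set String × List String) × String × Bool) w =>
              let acc := if s.2.2 then w else s.2.1 ++ " " ++ w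
              if (s.1.1).contains acc then ((s.1.1, s.1.2), acc, false)
              else ((PySem.Set.add s.1.1 acc, s.1.2 ++ [acc]), acc, false))
            ((st.1, st.2), "", true)).1)
        (seen, res)).2
      = l.foldl (fun results i =>
          (PySem.List.pyRange i (keywords.length : Int) 1).foldl (fun r j =>
            let keyword := PySem.Str.join " " (PySem.List.slice keywords (some i) (some (j + 1)))
            if keyword ∈ r then r else r ++ [keyword]) results) res := by
  induction l generalizing seen res with
  | nil => rfl
  | cons i t iht =>
    obtain ⟨hi0, hilen⟩ := hb i (List.mem_cons_self ..)
    have hcast : i = ((i.toNat : Nat) : Int) := (Int.toNat_of_nonneg hi0).symm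
    rw [List.foldl_cons, List.foldl_cons, hcast]
    have hle : i.toNat + 0 ≤ keywords.length := by omega
    have hA := pv_inner_A keywords i.toNat (keywords.length - (i.toNat + 0)) 0 res rfl hle
    simp only [Nat.add_zero, List.take_zero, decide_true] at hA
    rw [pvPJ_true_irrel _ ""] at hA
    have hslice : PySem.List.slice keywords (some ((i.toNat : Nat) : Int)) none = keywords.drop i.toNat :=
      PySem.List.slice_from_natCast keywords i.toNat
    rw [hslice]
    have hB := pv_inner_B (keywords.drop i.toNat) "" true seen res hc
    rw [hA, ← hB.1]
    have := iht (fun j hj => hb j (List.mem_cons_of_mem _ hj))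
      ((keywords.drop i.toNat).foldl
        (fun (s : (PySem.Set String × List String) × String × Bool) w =>
          let acc := if s.2.2 then w else s.2.1 ++ " " ++ w
          if (s.1.1).contains acc then ((s.1.1, s.1.2), acc, false)
          else ((PySem.Set.add s.1.1 acc, s.1.2 ++ [acc]), acc, false))
        ((seen, res), "", true)).1.1
      ((keywords.drop i.toNat).foldl
        (fun (s : (PySem.Set String × List String) × String × Bool) w =>
          let acc := if s.2.2 then w else s.2.1 ++ " " ++ w
          if (s.1.1).contains acc then ((s.1.1, s.1.2), acc, false)
          else ((PySem.Set.add s.1.1 acc, s.1.2 ++ [acc]), acc, false))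
        ((seen, res), "", true)).1.2
      hB.2
    simpa using this

-- ===== VERDICT (by name: the statement is the Claim_ definition above) =====
theorem concatenate_keywords_spec : Claim_equal_concatenate_keywords := by
  intro keywords _
  unfold Spec_concatenate_keywords concatenate_keywords concatenate_keywords_alt
  exact (pv_outer keywords _
    (fun j hj => ⟨((PySem.List.mem_pyRange_one).1 hj).1,
      le_of_lt ((PySem.List.mem_pyRange_one).1 hj).2⟩)
    PySem.Set.empty [] (by simp [PySem.Set.empty])).symm
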